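-- pv_equiv track=rewrite | github.com/J-M-PUNK/tideway | scripts/check_release_signatures.py | find_missing_minisig
-- ===== SOURCE A (Python) =====
-- INSTALLER_SUFFIXES: tuple[str, ...] = (".dmg", ".exe", ".AppImage")
--
-- def find_missing_minisig(asset_names: list[str]) -> list[str]:
--     """Return the installer asset names that lack a `.minisig`
--     sidecar in `asset_names`.
--
--     `asset_names` is the flat list of every asset filename on a
--     GitHub release. Order doesn't matter. The check is exact-name:
--     `Foo-1.0.dmg` is satisfied iff `Foo-1.0.dmg.minisig` is also
--     in the list.
--     """
--     names = set(asset_names)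
--     missing: list[str] = []
--     for name in asset_names:
--         if not name.endswith(INSTALLER_SUFFIXES):
--             continue
--         if f"{name}.minisig" not in names:
--             missing.append(name)
--     return missing
-- ===== SOURCE B (Python) =====
-- INSTALLER_SUFFIXES: tuple[str, ...] = (".dmg", ".exe", ".AppImage")
--
-- def find_missing_minisig(asset_names: list[str]) -> list[str]:
--     # Subtractive approach: start from the full candidate list of installer
--     # assets (in order), then make a second pass over the assets and, for each
--     # .minisig sidecar encountered, erase its base name from the candidates.
--     # No set and no per-candidate membership probe: the sidecars drive
--     # deletions from the candidate list.
--     missing = [n for n in asset_names if n.endswith(INSTALLER_SUFFIXES)]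
--     for n in asset_names:
--         if n.endswith(".minisig"):
--             base = n[: -len(".minisig")]
--             missing = [m for m in missing if m != base]
--     return missing
-- ===== Notes on version B (the rewrite author's own statement) =====
-- stated objective: alternative
-- what changed: B is subtractive: it first collects every installer asset as a candidate and then erases candidates by walking the sidecars (each .minisig deletes its base name from the candidate list), instead of probing a set of all names for each installer's expected sidecar.
import Mathlib
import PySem

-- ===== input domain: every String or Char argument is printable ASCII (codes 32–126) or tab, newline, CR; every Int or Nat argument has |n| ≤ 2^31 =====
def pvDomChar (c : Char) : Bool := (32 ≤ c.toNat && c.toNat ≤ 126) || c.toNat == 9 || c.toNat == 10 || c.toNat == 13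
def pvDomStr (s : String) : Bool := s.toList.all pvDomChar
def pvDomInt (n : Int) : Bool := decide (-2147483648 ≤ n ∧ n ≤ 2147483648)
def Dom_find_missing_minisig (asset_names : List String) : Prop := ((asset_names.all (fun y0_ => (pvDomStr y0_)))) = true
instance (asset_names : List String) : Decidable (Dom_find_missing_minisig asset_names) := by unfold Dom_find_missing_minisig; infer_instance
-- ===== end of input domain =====

-- B (alternative): subtractive — collect all installer candidates, then walk the sidecars
-- and erase each sidecar's base name from the candidate list (no set, no membership probe).

def INSTALLER_SUFFIXES : List String := [".dmg", ".exe", ".AppImage"]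

-- ===== PORT A =====
def find_missing_minisig (asset_names : List String) : List String :=
  let names : PySem.Set String := PySem.Set.ofList asset_names
  asset_names.foldl (fun missing name =>
    if !(INSTALLER_SUFFIXES.any fun suf => PySem.Str.endswith name suf) then missing
    else if !(PySem.Set.contains names (name ++ ".minisig")) then missing ++ [name]
    else missing) []

-- ===== PORT B =====
def find_missing_minisig_alt (asset_names : List String) : List String :=
  let missing := asset_names.filter (fun n => INSTALLER_SUFFIXES.any fun suf => PySem.Str.endswith n suf)
  asset_names.foldl (fun missing n =>
    if PySem.Str.endswith n ".minisig" then
      let base := PySem.Str.slice n none (some (-8))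
      missing.filter (fun m => m != base)
    else missing) missing

-- ===== PRECONDITION & SPEC =====
def Spec_find_missing_minisig (asset_names : List String) (out : List String) : Prop := out = find_missing_minisig_alt asset_names
instance (asset_names : List String) (out : List String) : Decidable (Spec_find_missing_minisig asset_names out) := by unfold Spec_find_missing_minisig; infer_instance

-- ===== CLAIM (what is proved, stated in full; the proofs are below) =====
def Claim_equal_find_missing_minisig : Prop := ∀ (asset_names : List String), Dom_find_missing_minisig asset_names → Spec_find_missing_minisig asset_names (find_missing_minisig asset_names)

-- ===== LEMMAS AND PROOFS =====

theorem strip_of_endswith (m : String) (h : PySem.Str.endswith m ".minisig" = true) :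
    m = (PySem.Str.slice m none (some (-8))) ++ ".minisig" := by
  rw [PySem.Str.endswith_eq, PySem.Chars.endswith_iff] at h
  obtain ⟨t, ht⟩ := h
  rw [← String.toList_inj]
  have hsl : (PySem.Str.slice m none (some (-8))).toList = m.toList.take (m.toList.length - 8) := by
    simp [PySem.Str.slice]
    rw [PySem.List.slice_to_neg_ofNat m.toList 8 (by omega)]
    simp
  rw [String.toList_append, hsl, ← ht]
  simp

theorem strip_append (x : String) : PySem.Str.slice (x ++ ".minisig") none (some (-8)) = x := by
  rw [← String.toList_inj]
  have hsl : (PySem.Str.slice (x ++ ".minisig") none (some (-8))).toList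
      = (x ++ ".minisig").toList.take ((x ++ ".minisig").toList.length - 8) := by
    simp [PySem.Str.slice]
    rw [PySem.List.slice_to_neg_ofNat _ 8 (by omega)]
    simp
  rw [hsl]; simp

theorem endswith_append_minisig (x : String) :
    PySem.Str.endswith (x ++ ".minisig") ".minisig" = true := by
  rw [PySem.Str.endswith_eq, PySem.Chars.endswith_iff]
  exact ⟨x.toList, by simp⟩

-- the erasure loop of B equals one filter by "no sidecar in l strips to m"
theorem foldB (l : List String) (acc : List String) :
    l.foldl (fun missing n =>
      if PySem.Str.endswith n ".minisig" then
        missing.filter (fun m => m != PySem.Str.slice n none (some (-8)))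
      else missing) acc
    = acc.filter (fun m => l.all (fun n =>
        !(PySem.Str.endswith n ".minisig" && (PySem.Str.slice n none (some (-8)) == m)))) := by
  induction l generalizing acc with
  | nil => simp
  | cons a l ih =>
    simp only [List.foldl_cons, List.all_cons]
    by_cases h : PySem.Str.endswith a ".minisig" = true
    · rw [if_pos h, ih, List.filter_filter]
      apply List.filter_congr
      intro m _
      rw [PySem.Str.endswith_eq,
        show (".minisig" : String).toList = ['.','m','i','n','i','s','i','g'] from rfl] at h
      simp [h, bne, Bool.and_comm, BEq.comm]
    · rw [if_neg h, ih]
      apply List.filter_congr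
      intro m _
      simp only [PySem.Str.endswith_eq, Bool.not_eq_true,
        show (".minisig" : String).toList = ['.','m','i','n','i','s','i','g'] from rfl] at h
      simp [h]

-- the append loop of A equals one filter
theorem foldA (names : PySem.Set String) (l : List String) (acc : List String) :
    l.foldl (fun missing name =>
      if !(INSTALLER_SUFFIXES.any fun suf => PySem.Str.endswith name suf) then missing
      else if !(PySem.Set.contains names (name ++ ".minisig")) then missing ++ [name]
      else missing) acc
    = acc ++ l.filter (fun name =>
        (INSTALLER_SUFFIXES.any fun suf => PySem.Str.endswith name suf)
          && !(PySem.Set.contains names (name ++ ".minisig"))) := by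
  induction l generalizing acc with
  | nil => simp
  | cons a l ih =>
    simp only [List.foldl_cons, List.filter_cons, ih]
    by_cases h1 : (INSTALLER_SUFFIXES.any fun suf => PySem.Str.endswith a suf) = true
    · by_cases h2 : PySem.Set.contains names (a ++ ".minisig") = true
      · rw [h1, h2]; simp
      · rw [h1, Bool.eq_false_iff.mpr h2]; simp
    · rw [Bool.eq_false_iff.mpr h1]; simp

-- A's membership probe for x agrees with B's "no sidecar strips to x" scan
theorem probe_eq_scan (asset_names : List String) (x : String) :
    (!(PySem.Set.contains (PySem.Set.ofList asset_names) (x ++ ".minisig")))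
      = asset_names.all (fun n =>
        !(PySem.Str.endswith n ".minisig" && (PySem.Str.slice n none (some (-8)) == x))) := by
  rw [Bool.eq_iff_iff, Bool.not_eq_true', Bool.eq_false_iff, Ne, PySem.Set.contains_iff,
      PySem.Set.mem_ofList, List.all_eq_true]
  constructor
  · intro hnb n hn
    rw [Bool.not_eq_true', Bool.and_eq_false_iff]
    by_cases he : PySem.Str.endswith n ".minisig" = true
    · right
      rw [beq_eq_false_iff_ne]
      intro hst
      exact hnb (by rw [← hst, ← strip_of_endswith n he]; exact hn)
    · left; exact Bool.eq_false_iff.mpr he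
  · intro hall hmem
    have h1 := hall _ hmem
    rw [endswith_append_minisig x, strip_append x] at h1
    simp at h1

-- ===== VERDICT (by name: the statement is the Claim_ definition above) =====
theorem find_missing_minisig_spec : Claim_equal_find_missing_minisig := by
  intro asset_names _
  unfold Spec_find_missing_minisig
  unfold find_missing_minisig find_missing_minisig_alt
  rw [foldA, foldB, List.filter_filter]
  simp only [List.nil_append]
  apply List.filter_congr
  intro x _
  rw [probe_eq_scan asset_names x, Bool.and_comm]
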